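-- pv_equiv track=rewrite | github.com/J-Readev/HyperionDev-Projects | T24/my_function.py | add_hello
-- ===== SOURCE A (Python) =====
-- def add_hello(funct_string):
--
--     changed_string = ""
--
--     x = 0
--
--     for word in funct_string.split():
--         #Using this the below in order to detetmine where to add the hello.
--         if x % 2 == 1:
--
--             changed_string += "hello "
--
--         else:
--
--             changed_string += word + " "
--
--         x += 1
--     #Removing spaces from end
--     changed_string = changed_string[:-1]
--     #Using return to give the final sentence.
--     return changed_string
-- ===== SOURCE B (Python) =====
-- def add_hello(funct_string):
--     words = funct_string.split()
--     words[1::2] = ["hello"] * len(words[1::2])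
--     return " ".join(words)
-- ===== Notes on version B (the rewrite author's own statement) =====
-- stated objective: idiomatic
-- what changed: Replaces the index-counter loop with per-word parity branching and trailing-space trimming by bulk strided slice assignment over the split word list followed by ' '.join.
import Mathlib
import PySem

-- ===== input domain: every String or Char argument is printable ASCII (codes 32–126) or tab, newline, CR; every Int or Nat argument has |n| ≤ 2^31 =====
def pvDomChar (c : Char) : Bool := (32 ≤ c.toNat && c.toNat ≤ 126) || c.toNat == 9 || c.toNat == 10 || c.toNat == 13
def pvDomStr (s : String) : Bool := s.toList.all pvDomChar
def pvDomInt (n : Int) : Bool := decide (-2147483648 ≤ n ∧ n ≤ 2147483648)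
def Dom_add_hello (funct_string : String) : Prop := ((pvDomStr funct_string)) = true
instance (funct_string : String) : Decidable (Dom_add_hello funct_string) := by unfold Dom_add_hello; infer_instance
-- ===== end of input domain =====

-- B replaces A's index-counter loop (per-word parity branch + trailing-space trim) by
-- bulk replacement of the odd-index slice of the word list followed by " ".join (idiomatic).


-- ===== PORT A =====
-- the for-loop: state is (changed_string, x); words handled as lists of code points
def add_hello_loop : List (List Char) → Int → List Char → List Char
  | [], _, acc => acc
  | w :: ws, x, acc =>
    if x % 2 == 1 then add_hello_loop ws (x + 1) (acc ++ ['h','e','l','l','o',' '])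
    else add_hello_loop ws (x + 1) (acc ++ w ++ [' '])

def add_hello (funct_string : String) : String :=
  String.ofList (PySem.List.slice
    (add_hello_loop ((PySem.Str.split₀ funct_string).map String.toList) 0 [])
    none (some (-1)))   -- changed_string[:-1]

-- ===== PORT B =====
-- words[1::2] = ["hello"] * len(words[1::2]) : replace every odd-index word
def pvReplaceOdd : List String → List String
  | [] => []
  | [w] => [w]
  | w :: _ :: rest => w :: "hello" :: pvReplaceOdd rest

def add_hello_alt (funct_string : String) : String :=
  PySem.Str.join " " (pvReplaceOdd (PySem.Str.split₀ funct_string))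

-- ===== PRECONDITION & SPEC =====
def Spec_add_hello (funct_string : String) (out : String) : Prop := out = add_hello_alt funct_string
instance (funct_string : String) (out : String) : Decidable (Spec_add_hello funct_string out) := by unfold Spec_add_hello; infer_instance

-- ===== CLAIM (what is proved, stated in full; the proofs are below) =====
def Claim_equal_add_hello : Prop := ∀ (funct_string : String), Dom_add_hello funct_string → Spec_add_hello funct_string (add_hello funct_string)

-- ===== LEMMAS AND PROOFS =====

theorem add_hello_loop_append (ws : List (List Char)) : ∀ (x : Int) (acc : List Char),
    add_hello_loop ws x acc = acc ++ add_hello_loop ws x [] := by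
  induction ws with
  | nil => intro x acc; simp [add_hello_loop]
  | cons w ws ih =>
    intro x acc
    cases hb : (x % 2 == 1) with
    | true =>
      simp only [add_hello_loop, hb, if_true]
      rw [ih (x + 1) (acc ++ ['h','e','l','l','o',' ']), ih (x + 1) ([] ++ ['h','e','l','l','o',' '])]
      simp [List.append_assoc]
    | false =>
      simp only [add_hello_loop, hb, Bool.false_eq_true, if_false]
      rw [ih (x + 1) (acc ++ w ++ [' ']), ih (x + 1) ([] ++ w ++ [' '])]
      simp [List.append_assoc]

-- the loop, started at even x, produces the B-side word list with each word space-terminated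
theorem add_hello_loop_flat : ∀ (ws : List String) (x : Int), x % 2 = 0 →
    add_hello_loop (ws.map String.toList) x [] =
      ((pvReplaceOdd ws).map (fun w => w.toList ++ [' '])).flatten
  | [], _, _ => by simp [add_hello_loop, pvReplaceOdd]
  | [w], x, hx => by
    have h1 : (x % 2 == 1) = false := beq_eq_false_iff_ne.mpr (by omega)
    simp [add_hello_loop, h1, pvReplaceOdd]
  | w :: v :: rest, x, hx => by
    have h1 : (x % 2 == 1) = false := beq_eq_false_iff_ne.mpr (by omega)
    have h2 : ((x + 1) % 2 == 1) = true := beq_iff_eq.mpr (by omega)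
    have h3 : (x + 2) % 2 = 0 := by omega
    have ih := add_hello_loop_flat rest (x + 2) h3
    have hxx : x + 1 + 1 = x + 2 := by ring
    simp only [List.map_cons, add_hello_loop, h1, h2, if_true, if_false, Bool.false_eq_true,
      List.nil_append]
    rw [add_hello_loop_append, hxx]
    simp [ih, pvReplaceOdd]
termination_by ws => ws.length

theorem flat_dropLast : ∀ (l : List String),
    ((l.map (fun w => w.toList ++ [' '])).flatten).dropLast =
      PySem.Chars.join [' '] (l.map String.toList) := by
  intro l
  induction l with
  | nil => simp [PySem.Chars.join_nil]
  | cons w ps ih =>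
    cases ps with
    | nil => simp [PySem.Chars.join_singleton]
    | cons p ps' =>
      have hne : (((p :: ps').map (fun w => w.toList ++ [' '])).flatten) ≠ [] := by
        simp
      rw [List.map_cons, List.flatten_cons, List.dropLast_append_of_ne_nil hne, ih]
      conv_rhs => rw [List.map_cons, List.map_cons, PySem.Chars.join_cons_cons]
      simp

theorem add_hello_spec : Claim_equal_add_hello := by
  intro s _
  unfold Spec_add_hello add_hello add_hello_alt
  rw [PySem.List.slice_to_neg_one]
  rw [add_hello_loop_flat (PySem.Str.split₀ s) 0 (by decide), flat_dropLast]
  rw [(by decide : ([' '] : List Char) = (" " : String).toList),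
    ← PySem.Str.toList_join, String.ofList_toList]
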